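-- pv_equiv track=rewrite | github.com/TOLAAJAO/cmpsc-132 | Spring 2026 work/notes/Module 1 Pratice Exercise.py | get_isbn
-- ===== SOURCE A (Python) =====
-- def get_isbn(part_num):
--     '''
--         >>> get_isbn(3601267)
--         '003601267X'
--         >>> get_isbn(13601267)
--         '0136012671'
--         >>> get_isbn(13031997)
--         '013031997X'
--     '''
--     total = 0
--     k = 9
--     isbn = ['0'] * 10
--     while part_num > 0 and k > 0:
--         digit = part_num%10
--         total += (digit * k)
--         k -= 1
--         isbn[k] = str(digit)
--         part_num = part_num//10
--
--     checksum = total % 11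
--     if checksum == 10:
--         isbn[9] = 'X'
--     else:
--         isbn[9] = str(checksum)
--
--     return ''.join(isbn)
-- ===== SOURCE B (Python) =====
-- def get_isbn(part_num):
--     s = str(part_num if part_num > 0 else 0)[-9:].zfill(9)
--     total = sum((ord(c) - 48) * (i + 1) for i, c in enumerate(s))
--     checksum = total % 11
--     return s + ('X' if checksum == 10 else str(checksum))
-- ===== Notes on version B (the rewrite author's own statement) =====
-- stated objective: idiomatic
-- what changed: B replaces A's right-to-left while loop with in-place list mutation by a direct string computation: take the last 9 digits of str(n) (n clamped to 0), zero-pad with zfill, and compute the weighted checksum in one left-to-right enumerate pass.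
import Mathlib
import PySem

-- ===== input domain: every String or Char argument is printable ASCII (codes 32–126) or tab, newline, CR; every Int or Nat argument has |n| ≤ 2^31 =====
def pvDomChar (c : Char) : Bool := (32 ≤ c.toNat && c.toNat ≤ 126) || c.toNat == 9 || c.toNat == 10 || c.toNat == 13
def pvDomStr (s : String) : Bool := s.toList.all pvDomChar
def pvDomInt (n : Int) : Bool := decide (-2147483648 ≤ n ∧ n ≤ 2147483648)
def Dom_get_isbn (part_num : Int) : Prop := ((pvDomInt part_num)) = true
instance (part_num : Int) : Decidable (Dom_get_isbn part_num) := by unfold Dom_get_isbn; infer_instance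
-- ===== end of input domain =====

-- B computes the ISBN directly from the decimal string (last 9 digits, zero-padded) with one
-- left-to-right weighted pass, instead of A's right-to-left while loop mutating a list in place.

-- ===== PORT A =====
def get_isbn_loop (part_num : Int) (total : Int) (k : Nat) (isbn : List String) : Int × List String :=
  match k with
  | 0 => (total, isbn)
  | k' + 1 =>
    if part_num > 0 then
      let digit := PySem.Int.mod part_num 10
      get_isbn_loop (PySem.Int.floordiv part_num 10) (total + digit * ((k' : Int) + 1)) k'
        (PySem.List.pySetD isbn (k' : Int) (PySem.Int.toStr digit))
    else (total, isbn)

def get_isbn (part_num : Int) : String :=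
  let r := get_isbn_loop part_num 0 9 (List.replicate 10 "0")
  let checksum := PySem.Int.mod r.1 11
  let isbn := PySem.List.pySetD r.2 (9 : Int) (if checksum = 10 then "X" else PySem.Int.toStr checksum)
  PySem.Str.join "" isbn

-- ===== PORT B =====
def get_isbn_alt (part_num : Int) : String :=
  let s := PySem.Chars.zfill
    (PySem.List.slice (PySem.Int.toChars (if part_num > 0 then part_num else 0)) (some (-9)) none) 9
  let total := (PySem.List.enumerate s).foldl
    (fun acc p => acc + ((p.2.toNat : Int) - 48) * (p.1 + 1)) 0
  let checksum := PySem.Int.mod total 11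
  String.ofList (s ++ (if checksum = 10 then ['X'] else PySem.Int.toChars checksum))

-- ===== PRECONDITION & SPEC =====
def Spec_get_isbn (part_num : Int) (out : String) : Prop := out = get_isbn_alt part_num
instance (part_num : Int) (out : String) : Decidable (Spec_get_isbn part_num out) := by unfold Spec_get_isbn; infer_instance

-- ===== CLAIM (what is proved, stated in full; the proofs are below) =====
def Claim_equal_get_isbn : Prop := ∀ (part_num : Int), Dom_get_isbn part_num → Spec_get_isbn part_num (get_isbn part_num)

-- ===== LEMMAS AND PROOFS =====

-- decimal digits of m, most significant first, no leading zeros (the chars of str(m))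
def msf (m : Nat) : List Char :=
  if _h : m < 10 then [Nat.digitChar m]
  else msf (m / 10) ++ [Nat.digitChar (m % 10)]
  decreasing_by exact Nat.div_lt_self (by omega) (by norm_num)

-- the low k decimal digits of m, most significant first, zero padded to length k
def padC (m : Nat) (k : Nat) : List Char :=
  match k with
  | 0 => []
  | k' + 1 => padC (m / 10) k' ++ [Nat.digitChar (m % 10)]

-- the position-weighted digit sum over the low k digits, positions offset by st
def wsum (m : Nat) (k : Nat) (st : Int) : Int :=
  match k with
  | 0 => 0
  | k' + 1 => wsum (m / 10) k' st + (m % 10 : Nat) * (st + k' + 1)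

theorem msf_ne_nil (m : Nat) : msf m ≠ [] := by
  unfold msf; split <;> simp

theorem msf_lt (m : Nat) (h : m < 10) : msf m = [Nat.digitChar m] := by
  unfold msf; simp [h]

theorem msf_ge (m : Nat) (h : ¬ m < 10) : msf m = msf (m / 10) ++ [Nat.digitChar (m % 10)] := by
  conv_lhs => unfold msf
  simp [h]

theorem padC_zero (k : Nat) : padC 0 k = List.replicate k '0' := by
  induction k with
  | zero => rfl
  | succ k ih => simp [padC, ih, List.replicate_succ' (n := k)]; rfl

theorem len_padC (m k : Nat) : (padC m k).length = k := by
  induction k generalizing m with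
  | zero => rfl
  | succ k ih => simp [padC, ih]

theorem wsum_zero (k : Nat) (st : Int) : wsum 0 k st = 0 := by
  induction k with
  | zero => rfl
  | succ k ih => simp [wsum, ih]

theorem digitChar_toNat (d : Nat) (h : d < 10) : (Nat.digitChar d).toNat = 48 + d := by
  interval_cases d <;> decide

theorem toDigitsCore_eq_msf (fuel : Nat) : ∀ (m : Nat) (acc : List Char), m < fuel →
    Nat.toDigitsCore 10 fuel m acc = msf m ++ acc := by
  induction fuel with
  | zero => intro m acc h; omega
  | succ fuel ih =>
    intro m acc h
    rw [Nat.toDigitsCore]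
    by_cases h10 : m < 10
    · have : m / 10 = 0 := Nat.div_eq_of_lt h10
      simp [this, msf_lt m h10, Nat.mod_eq_of_lt h10]
    · have hne : m / 10 ≠ 0 := by omega
      simp only [hne, if_false]
      rw [ih (m / 10) _ (by omega), msf_ge m h10]
      simp

theorem toChars_nat (m : Nat) : PySem.Int.toChars (m : Int) = msf m := by
  have : ¬ ((m : Int) < 0) := Int.not_lt.mpr (Int.natCast_nonneg m)
  simp only [PySem.Int.toChars, this, if_false, Int.toNat_natCast]
  rw [Nat.toDigits, toDigitsCore_eq_msf (m + 1) m [] (by omega)]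
  simp

theorem len_msf_le (k : Nat) : ∀ m, 0 < k → m < 10 ^ k → (msf m).length ≤ k := by
  induction k with
  | zero => intro m h; omega
  | succ k ih =>
    intro m _ hm
    by_cases h10 : m < 10
    · rw [msf_lt m h10]; simp
    · have hk : 0 < k := by
        by_contra hk0
        have : k = 0 := by omega
        subst this; simp at hm; omega
      rw [msf_ge m h10]
      have hdiv : m / 10 < 10 ^ k := by
        have h := hm; rw [pow_succ] at h; omega
      have := ih (m / 10) hk hdiv
      simp; omega

theorem le_len_msf (k : Nat) : ∀ m, 10 ^ k ≤ m → k < (msf m).length := by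
  induction k with
  | zero =>
    intro m _
    have := msf_ne_nil m
    cases hmsf : msf m with
    | nil => exact absurd hmsf this
    | cons c cs => simp
  | succ k ih =>
    intro m hm
    have h10 : ¬ m < 10 := by
      have : 10 ≤ 10 ^ (k + 1) := by
        calc (10:Nat) = 10 ^ 1 := by norm_num
        _ ≤ 10 ^ (k+1) := Nat.pow_le_pow_right (by norm_num) (by omega)
      omega
    rw [msf_ge m h10]
    have : 10 ^ k ≤ m / 10 := by
      rw [Nat.le_div_iff_mul_le (by norm_num)]
      calc 10 ^ k * 10 = 10 ^ (k + 1) := (pow_succ 10 k).symm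
      _ ≤ m := hm
    have := ih (m / 10) this
    simp; omega

theorem padC_eq (k : Nat) : ∀ m, 0 < k → m < 10 ^ k →
    padC m k = List.replicate (k - (msf m).length) '0' ++ msf m := by
  induction k with
  | zero => intro m h; omega
  | succ k ih =>
    intro m _ hm
    by_cases h0 : m = 0
    · subst h0
      rw [padC_zero, msf_lt 0 (by norm_num)]
      have : Nat.digitChar 0 = '0' := by decide
      rw [this]
      rw [List.replicate_succ' (n := k)]
      simp
    by_cases h10 : m < 10
    · show padC (m / 10) k ++ [Nat.digitChar (m % 10)] = _
      rw [Nat.div_eq_of_lt h10, Nat.mod_eq_of_lt h10, padC_zero, msf_lt m h10]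
      simp
    · have hk : 0 < k := by
        by_contra hk0
        have : k = 0 := by omega
        subst this; simp at hm; omega
      have hdiv : m / 10 < 10 ^ k := by
        have h := hm; rw [pow_succ] at h; omega
      have hlen : (msf (m / 10)).length ≤ k := len_msf_le k (m / 10) hk hdiv
      show padC (m / 10) k ++ [Nat.digitChar (m % 10)] = _
      rw [ih (m / 10) hk hdiv, msf_ge m h10]
      have : (k + 1) - (msf (m / 10) ++ [Nat.digitChar (m % 10)]).length
           = k - (msf (m / 10)).length := by
        simp only [List.length_append, List.length_cons, List.length_nil]; omega
      rw [this, List.append_assoc]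

theorem drop_msf_eq_padC : ∀ m k, k ≤ (msf m).length →
    (msf m).drop ((msf m).length - k) = padC m k := by
  intro m
  induction m using Nat.strong_induction_on with
  | _ m ih =>
    intro k hk
    by_cases h10 : m < 10
    · rw [msf_lt m h10] at *
      simp at hk
      interval_cases k
      · simp [padC]
      · simp [padC, Nat.mod_eq_of_lt h10]
    · rw [msf_ge m h10] at *
      match k with
      | 0 => simp [padC]
      | k' + 1 =>
        have hlen : k' ≤ (msf (m / 10)).length := by simp at hk; omega
        have hd : (msf (m / 10) ++ [Nat.digitChar (m % 10)]).length - (k' + 1)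
                = (msf (m / 10)).length - k' := by
          simp only [List.length_append, List.length_cons, List.length_nil]; omega
        rw [hd, List.drop_append_of_le_length (by omega)]
        rw [ih (m / 10) (Nat.div_lt_self (by omega) (by norm_num)) k' hlen]
        rfl

theorem zfill_msf (m : Nat) (h : (msf m).length ≤ 9) :
    PySem.Chars.zfill (msf m) 9 = List.replicate (9 - (msf m).length) '0' ++ msf m := by
  have hsign : ∀ c cs, msf m = c :: cs → ¬ (c = '+' ∨ c = '-') := by
    intro c cs hmsf
    clear h
    induction m using Nat.strong_induction_on generalizing c cs with
    | _ m ih =>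
      by_cases h10 : m < 10
      · rw [msf_lt m h10] at hmsf
        obtain ⟨hc, -⟩ := List.cons.inj hmsf
        subst hc
        interval_cases m <;> decide
      · rw [msf_ge m h10] at hmsf
        cases hmm : msf (m / 10) with
        | nil => exact absurd hmm (msf_ne_nil _)
        | cons c' cs' =>
          rw [hmm] at hmsf
          obtain ⟨hc, -⟩ := List.cons.inj hmsf
          subst hc
          exact ih (m / 10) (Nat.div_lt_self (by omega) (by norm_num)) c' cs' hmm
  unfold PySem.Chars.zfill
  by_cases h9 : (9 : Int) ≤ (msf m).length
  · have : (msf m).length = 9 := by omega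
    simp [this]
  · simp only [h9, if_false]
    cases hmsf : msf m with
    | nil => exact absurd hmsf (msf_ne_nil m)
    | cons c cs =>
      have := hsign c cs hmsf
      simp only [this, if_false]
      congr 1

theorem loop_eq (k : Nat) : ∀ (m : Nat) (total : Int) (rest : List String),
    get_isbn_loop (m : Int) total k (List.replicate k "0" ++ rest)
      = (total + wsum m k 0, (padC m k).map (fun c => String.ofList [c]) ++ rest) := by
  induction k with
  | zero => intro m total rest; simp [get_isbn_loop, wsum, padC]
  | succ k ih =>
    intro m total rest
    by_cases h0 : m = 0
    · subst h0
      simp only [get_isbn_loop]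
      rw [if_neg (by omega)]
      rw [wsum_zero, padC_zero]
      simp
    · have hpos : (0 : Int) < (m : Int) := by positivity
      simp only [get_isbn_loop, if_pos hpos]
      have hmod : PySem.Int.mod (m : Int) 10 = ((m % 10 : Nat) : Int) := by
        exact_mod_cast PySem.Int.mod_natCast m 10
      have hdiv : PySem.Int.floordiv (m : Int) 10 = ((m / 10 : Nat) : Int) := by
        exact_mod_cast PySem.Int.floordiv_natCast m 10
      rw [hmod, hdiv]
      rw [List.replicate_succ' (n := k), List.append_assoc]
      rw [PySem.List.pySetD_natCast]
      have hset : (List.replicate k "0" ++ (["0"] ++ rest)).set k (PySem.Int.toStr ((m % 10 : Nat) : Int))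
          = List.replicate k "0" ++ (PySem.Int.toStr ((m % 10 : Nat) : Int) :: rest) := by
        rw [List.set_append_right _ _ (by simp)]
        simp
      rw [hset, ih (m / 10)]
      have hstr : PySem.Int.toStr ((m % 10 : Nat) : Int) = String.ofList [Nat.digitChar (m % 10)] := by
        rw [PySem.Int.toStr, toChars_nat, msf_lt _ (Nat.mod_lt m (by norm_num))]
      simp only [Prod.mk.injEq]
      refine ⟨?_, ?_⟩
      · show total + (m % 10 : Nat) * ((k : Int) + 1) + wsum (m / 10) k 0
           = total + (wsum (m / 10) k 0 + (m % 10 : Nat) * (0 + (k : Int) + 1))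
        ring
      · rw [hstr]
        simp [padC]

theorem sum_eq (k : Nat) : ∀ (m : Nat) (st acc : Int),
    (PySem.List.enumerate (padC m k) st).foldl
        (fun acc p => acc + ((p.2.toNat : Int) - 48) * (p.1 + 1)) acc
      = acc + wsum m k st := by
  induction k with
  | zero => intro m st acc; simp [padC, wsum]
  | succ k ih =>
    intro m st acc
    show (PySem.List.enumerate (padC (m / 10) k ++ [Nat.digitChar (m % 10)]) st).foldl _ _ = _
    rw [PySem.List.enumerate_append, List.foldl_append, ih (m / 10)]
    rw [len_padC]
    simp only [PySem.List.enumerate_cons, PySem.List.enumerate_nil, List.foldl_cons, List.foldl_nil]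
    rw [digitChar_toNat (m % 10) (Nat.mod_lt m (by norm_num))]
    show acc + wsum (m / 10) k st + (48 + (m % 10 : Nat) - 48 : Int) * (st + k + 1)
       = acc + (wsum (m / 10) k st + (m % 10 : Nat) * (st + (k : Int) + 1))
    push_cast
    ring

theorem join_nil_flatten (l : List (List Char)) : PySem.Chars.join [] l = l.flatten := by
  induction l with
  | nil => rfl
  | cons x xs ih =>
    simp [PySem.Chars.join, List.intercalate] at *
    cases xs with
    | nil => simp
    | cons y ys => simpa [List.intercalate, List.intersperse] using ih

theorem pos_case (m : Nat) (hm : 0 < m) (hub : m < 10 ^ 10) :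
    get_isbn (m : Int) = get_isbn_alt (m : Int) := by
  have hpos : (0 : Int) < (m : Int) := by positivity
  -- B's padded string is padC m 9
  have hs : PySem.Chars.zfill
      (PySem.List.slice (PySem.Int.toChars ((m : Int))) (some (-9)) none) 9 = padC m 9 := by
    rw [toChars_nat]
    rw [PySem.List.slice_from_neg_ofNat (msf m) 9 (by norm_num)]
    by_cases h9 : m < 10 ^ 9
    · have hlen : (msf m).length ≤ 9 := len_msf_le 9 m (by norm_num) h9
      have : (msf m).length - 9 = 0 := by omega
      rw [this, List.drop_zero, zfill_msf m hlen, padC_eq 9 m (by norm_num) h9]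
    · have hlen : (msf m).length = 10 := by
        have h1 := len_msf_le 10 m (by norm_num) hub
        have h2 := le_len_msf 9 m (by omega)
        omega
      rw [hlen]
      have h9le : 9 ≤ (msf m).length := by omega
      rw [show (10 : Nat) - 9 = (msf m).length - 9 by omega, drop_msf_eq_padC m 9 h9le]
      unfold PySem.Chars.zfill
      rw [if_pos (by rw [len_padC]; norm_num)]
  -- totals agree
  have htot : get_isbn_loop (m : Int) 0 9 (List.replicate 10 "0")
      = (wsum m 9 0, (padC m 9).map (fun c => String.ofList [c]) ++ ["0"]) := by
    have := loop_eq 9 m 0 ["0"]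
    simpa using this
  dsimp only [get_isbn, get_isbn_alt]
  rw [if_pos hpos, htot, hs]
  rw [sum_eq 9 m 0 0]
  simp only [zero_add]
  apply String.ext
  set c := PySem.Int.mod (wsum m 9 0) 11 with hc
  have hcnn : 0 ≤ c := PySem.Int.mod_nonneg _ (by norm_num)
  -- A side
  have hsetfin : PySem.List.pySetD ((padC m 9).map (fun c => String.ofList [c]) ++ ["0"]) (9 : Int)
      (if c = 10 then "X" else PySem.Int.toStr c)
      = (padC m 9).map (fun c => String.ofList [c]) ++ [if c = 10 then "X" else PySem.Int.toStr c] := by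
    have h9 : ((9 : Nat) : Int) = (9 : Int) := by norm_num
    rw [← h9, PySem.List.pySetD_natCast]
    rw [List.set_append_right _ _ (by simp [len_padC])]
    simp [len_padC]
  rw [hsetfin]
  rw [PySem.Str.join]
  simp only [String.toList_ofList]
  rw [show ("" : String).toList = [] from rfl, join_nil_flatten]
  simp only [List.map_append, List.map_map, Function.comp_def, String.toList_ofList,
    List.flatten_append]
  have hflat : ∀ (l : List Char), (l.map fun x => [x]).flatten = l := by
    intro l; induction l with
    | nil => rfl
    | cons x xs ih => simp [ih]
  rw [hflat]
  congr 1
  by_cases hc10 : c = 10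
  · simp [hc10]
  · simp only [hc10, if_false, List.map_cons, List.map_nil, List.flatten_cons, List.flatten_nil,
      List.append_nil]
    rw [PySem.Int.toStr, String.toList_ofList]

-- ===== VERDICT (by name: the statement is the Claim_ definition above) =====
theorem get_isbn_spec : Claim_equal_get_isbn := by
  intro n hdom
  unfold Spec_get_isbn
  by_cases hn : 0 < n
  · obtain ⟨m, rfl⟩ := Int.eq_ofNat_of_zero_le (le_of_lt hn)
    have hm : 0 < m := by exact_mod_cast hn
    have hub : m < 10 ^ 10 := by
      unfold Dom_get_isbn pvDomInt at hdom
      rw [decide_eq_true_iff] at hdom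
      have : (m : Int) ≤ 2147483648 := hdom.2
      have : m ≤ 2147483648 := by exact_mod_cast this
      omega
    exact pos_case m hm hub
  · unfold get_isbn get_isbn_alt
    simp only [get_isbn_loop, if_neg hn]
    decide
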